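-- pv_equiv track=rewrite | github.com/davidflast/dyslexia | generate_arrays.py | generate_arrays
-- ===== SOURCE A (Python) =====
-- from itertools import permutations
-- from itertools import product
--
-- reversal_letters = {'b', 'd', 'p', 'q', 'm', 'w'}
--
-- reversal_map = dict(b="d", d="b", p="q", q="p", m="w", w="m")
--
-- def generate_arrays(autocorrect):
--     num_revs = len(list(x for x in autocorrect if x in reversal_letters))
--     perms = product([True, False], repeat = num_revs)
--     list_reversal = list()
--     for p in perms:
--         perm_string = ""
--         auto_position = 0
--         tf_position = 0;
--         for c in autocorrect:
--             if c in reversal_letters: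
--                 if not p[tf_position]:
--                     perm_string += reversal_map[c]
--                     tf_position += 1
--                 else:
--                     perm_string += c
--                     tf_position += 1
--             else:
--                 perm_string += c
--         list_reversal.append(perm_string)
--     final_list = list()
--     rev_position = 0;
--     for rev in list_reversal:
--         final_list.append(["".join(x) for x in permutations(rev,r=len(rev))])
--         rev_position += 1
--     return final_list
-- ===== SOURCE B (Python) =====
-- from itertools import permutations
--
-- reversal_letters = {'b', 'd', 'p', 'q', 'm', 'w'}
-- reversal_map = dict(b="d", d="b", p="q", q="p", m="w", w="m")
--
-- def generate_arrays(autocorrect):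
--     # Variants by structural recursion on the string (keep-letter branch first),
--     # instead of enumerating boolean masks.
--     def variants(s):
--         if not s:
--             return ['']
--         rest = variants(s[1:])
--         c = s[0]
--         if c in reversal_letters:
--             f = reversal_map[c]
--             return [c + r for r in rest] + [f + r for r in rest]
--         return [c + r for r in rest]
--     # All variants have the same length, so the permutations (as index orders)
--     # are computed ONCE on the positions and applied to each variant by indexing.
--     idx_perms = list(permutations(range(len(autocorrect))))
--     return [["".join([v[i] for i in idx]) for idx in idx_perms]
--             for v in variants(autocorrect)]
-- ===== Notes on version B (the rewrite author's own statement) =====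
-- stated objective: alternative
-- what changed: B builds the flip variants by structural recursion on the string (keep-branch first) instead of A's boolean-mask product with tf_position bookkeeping, and computes the permutations only ONCE, as index orders of the positions, applying each index order to every variant by indexing, instead of A's re-running itertools.permutations on every variant.
import Mathlib
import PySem

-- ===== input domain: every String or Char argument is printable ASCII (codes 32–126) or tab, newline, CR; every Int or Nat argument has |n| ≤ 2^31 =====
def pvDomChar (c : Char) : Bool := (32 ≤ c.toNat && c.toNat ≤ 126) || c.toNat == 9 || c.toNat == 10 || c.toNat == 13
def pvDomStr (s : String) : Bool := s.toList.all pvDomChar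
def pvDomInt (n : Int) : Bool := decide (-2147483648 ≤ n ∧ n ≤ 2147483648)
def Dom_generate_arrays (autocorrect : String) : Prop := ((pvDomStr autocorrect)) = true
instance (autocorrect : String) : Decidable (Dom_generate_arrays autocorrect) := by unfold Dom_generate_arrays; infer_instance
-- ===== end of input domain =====

-- B builds variants by structural recursion on the string instead of A's boolean-mask
-- product with index bookkeeping, and computes the permutations once as index orders
-- applied to every variant by indexing (objective: alternative).

-- shared module constants (reversal_letters / reversal_map)
def revLetters : List Char := ['b', 'd', 'p', 'q', 'm', 'w']

def revMap (c : Char) : Char :=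
  if c = 'b' then 'd' else if c = 'd' then 'b' else if c = 'p' then 'q'
  else if c = 'q' then 'p' else if c = 'm' then 'w' else 'm'

-- ===== PORT A =====
-- product([True, False], repeat = n): first coordinate varies slowest, True before False
def boolProducts : Nat → List (List Bool)
  | 0 => [[]]
  | n + 1 => ([true, false]).flatMap (fun b => (boolProducts n).map (fun t => b :: t))

-- the inner loop's body: state = (perm_string, tf_position); p[tf_position] is always in
-- range (tf_position counts reversal letters seen, and p has length num_revs), so getD is exact
def stepA (p : List Bool) (st : List Char × Nat) (c : Char) : List Char × Nat :=
  if c ∈ revLetters then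
    if !(p.getD st.2 true) then (st.1 ++ [revMap c], st.2 + 1)
    else (st.1 ++ [c], st.2 + 1)
  else (st.1 ++ [c], st.2)

def generate_arrays (autocorrect : String) : List (List String) :=
  let cs := autocorrect.toList
  let num_revs := (cs.filter (fun x => x ∈ revLetters)).length
  let list_reversal := (boolProducts num_revs).map (fun p =>
    String.ofList (cs.foldl (stepA p) ([], 0)).1)
  list_reversal.map (fun rev =>
    (PySem.List.permutations rev.toList rev.toList.length).map String.ofList)

-- ===== PORT B =====
-- def variants(s): recursion on the string, keep-letter branch first
def recVariants : List Char → List (List Char)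
  | [] => [[]]
  | c :: cs =>
    let rest := recVariants cs
    if c ∈ revLetters then rest.map (c :: ·) ++ rest.map (revMap c :: ·)
    else rest.map (c :: ·)

def generate_arrays_alt (autocorrect : String) : List (List String) :=
  let cs := autocorrect.toList
  -- permutations of the positions, computed once
  let idx_perms := PySem.List.permutations (List.range cs.length) cs.length
  -- v[i]: every i in an idx order is < len(v), so getD is exact (never the default)
  (recVariants cs).map (fun v =>
    idx_perms.map (fun idx => String.ofList (idx.map (fun i => v.getD i ' '))))

-- ===== PRECONDITION & SPEC =====
def Spec_generate_arrays (autocorrect : String) (out : List (List String)) : Prop := out = generate_arrays_alt autocorrect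
instance (autocorrect : String) (out : List (List String)) : Decidable (Spec_generate_arrays autocorrect out) := by unfold Spec_generate_arrays; infer_instance

-- ===== CLAIM (what is proved, stated in full; the proofs are below) =====
def Claim_equal_generate_arrays : Prop := ∀ (autocorrect : String), Dom_generate_arrays autocorrect → Spec_generate_arrays autocorrect (generate_arrays autocorrect)

-- ===== LEMMAS AND PROOFS =====

-- the inner loop of A, with p consumed as a list instead of indexed by tf_position
def buildG : List Char → List Bool → List Char
  | [], _ => []
  | c :: cs, q =>
    if c ∈ revLetters then (if q.getD 0 true then c else revMap c) :: buildG cs q.tail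
    else c :: buildG cs q

lemma foldA_eq_buildG (p : List Bool) (cs : List Char) (acc : List Char) (k : Nat) :
    (cs.foldl (stepA p) (acc, k)).1 = acc ++ buildG cs (p.drop k) := by
  induction cs generalizing acc k with
  | nil => simp [buildG]
  | cons c cs ih =>
    have hget : (p.drop k).getD 0 true = p.getD k true := by
      simp [List.getD_eq_getElem?_getD, List.getElem?_drop]
    have htail : (p.drop k).tail = p.drop (k + 1) := by
      rw [List.drop_add_one_eq_tail_drop]
    rw [List.foldl_cons]
    by_cases hc : c ∈ revLetters
    · cases hb : p.getD k true with
      | true =>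
        simp only [List.getD_eq_getElem?_getD] at hb hget
        have hstep : stepA p (acc, k) c = (acc ++ [c], k + 1) := by
          simp [stepA, hc, hb]
        rw [hstep, ih, buildG]
        simp [hc, hb, htail]
      | false =>
        simp only [List.getD_eq_getElem?_getD] at hb hget
        have hstep : stepA p (acc, k) c = (acc ++ [revMap c], k + 1) := by
          simp [stepA, hc, hb]
        rw [hstep, ih, buildG]
        simp [hc, hb, htail]
    · have hstep : stepA p (acc, k) c = (acc ++ [c], k) := by
        simp [stepA, hc]
      rw [hstep, ih, buildG]
      simp [hc]

-- A's variant list (via buildG) is exactly B's recursion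
lemma buildG_core (cs : List Char) :
    (boolProducts (cs.filter (fun x => x ∈ revLetters)).length).map (fun p => buildG cs p)
      = recVariants cs := by
  induction cs with
  | nil => simp [boolProducts, recVariants, buildG]
  | cons c cs ih =>
    by_cases hc : c ∈ revLetters
    · rw [List.filter_cons_of_pos (by simpa using hc), List.length_cons, boolProducts]
      show _ = recVariants (c :: cs)
      rw [recVariants]
      simp only [List.flatMap_cons, List.flatMap_nil, List.append_nil, List.map_append,
        List.map_map, if_pos hc]
      rw [← ih]
      congr 1 <;> · rw [List.map_map]
                    apply List.map_congr_left; intro p _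
                    simp [buildG, hc, Function.comp]
    · rw [List.filter_cons_of_neg (by simpa using hc)]
      show _ = recVariants (c :: cs)
      rw [recVariants]
      simp only [if_neg hc]
      rw [← ih, List.map_map]
      apply List.map_congr_left; intro p _
      simp [buildG, hc, Function.comp]

lemma list_reversal_eq (cs : List Char) :
    (boolProducts (cs.filter (fun x => x ∈ revLetters)).length).map (fun p =>
      String.ofList (cs.foldl (stepA p) ([], 0)).1)
      = (recVariants cs).map String.ofList := by
  rw [← buildG_core, List.map_map]
  apply List.map_congr_left
  intro p _
  show String.ofList (cs.foldl (stepA p) ([], 0)).1 = String.ofList (buildG cs p)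
  rw [foldA_eq_buildG p cs [] 0]
  simp

-- naturality of itertools-style permutations under map
lemma permutations_map {α β : Type} (f : α → β) (xs : List α) (r : Nat) :
    PySem.List.permutations (xs.map f) r = (PySem.List.permutations xs r).map (List.map f) := by
  induction r generalizing xs with
  | zero => simp [PySem.List.permutations]
  | succ r ih =>
    rw [PySem.List.permutations, PySem.List.permutations]
    rw [List.length_map, List.map_flatMap]
    congr 1
    funext i
    rw [List.getElem?_map]
    cases h : xs[i]? with
    | none => simp
    | some a =>
      simp only [Option.map_some]
      rw [List.eraseIdx_map, ih, List.map_map, List.map_map]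
      apply List.map_congr_left; intro p _; simp

-- a list of length n is the range of its positions, read through getD
lemma map_getD_range (v : List Char) :
    (List.range v.length).map (fun i => v.getD i ' ') = v := by
  apply List.ext_getElem
  · simp
  · intro i h1 h2
    simp [List.getD_eq_getElem?_getD, List.getElem?_eq_getElem h2]

-- every variant has the length of the input
lemma recVariants_length (cs : List Char) :
    ∀ v ∈ recVariants cs, v.length = cs.length := by
  induction cs with
  | nil => intro v hv; simp [recVariants] at hv; simp [hv]
  | cons c cs ih =>
    intro v hv
    rw [recVariants] at hv
    by_cases hc : c ∈ revLetters
    · rw [if_pos hc, List.mem_append] at hv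
      rcases hv with hv | hv <;>
      · obtain ⟨w, hw, rfl⟩ := List.mem_map.1 hv
        simp [ih w hw]
    · rw [if_neg hc] at hv
      obtain ⟨w, hw, rfl⟩ := List.mem_map.1 hv
      simp [ih w hw]

-- per-variant: permuting the variant = applying the index orders of the positions
lemma perms_of_variant (n : Nat) (v : List Char) (hv : v.length = n) :
    (PySem.List.permutations v n).map String.ofList
      = (PySem.List.permutations (List.range n) n).map
          (fun idx => String.ofList (idx.map (fun i => v.getD i ' '))) := by
  set g : Nat → Char := fun i => v.getD i ' ' with hg
  have hgr : (List.range n).map g = v := by subst hv; exact map_getD_range v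
  rw [← hgr, permutations_map, List.map_map]
  simp [Function.comp]

-- ===== VERDICT (by name: the statement is the Claim_ definition above) =====
theorem generate_arrays_spec : Claim_equal_generate_arrays := by
  intro autocorrect _
  unfold Spec_generate_arrays generate_arrays generate_arrays_alt
  dsimp only
  rw [list_reversal_eq, List.map_map]
  apply List.map_congr_left
  intro v hv
  have hlen : v.length = autocorrect.toList.length := recVariants_length _ v hv
  simpa [hlen] using perms_of_variant autocorrect.toList.length v hlen
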